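-- pv_equiv track=rewrite | github.com/SVNKoch/advent-of-code-2023 | day08 - walk network graph/task.py | step_count_till_zzz
-- ===== SOURCE A (Python) =====
-- def step_count_till_zzz(
--     path: str, network: dict[str, tuple[str, str]], start: str
-- ) -> int:
--     step_count = 0
--     current_node = start
--     while True:
--         steps, end_node = follow_path_to_zzz(path, network, current_node)
--         step_count += steps
--         if end_node == "ZZZ":
--             return step_count
--         current_node = end_node
--
-- def follow_path_to_zzz(
--     path: str, network: dict[str, tuple[str, str]], start: str
-- ) -> tuple[int, str]:
--     current_node = start
--     for index, direction in enumerate(path):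
--         direction_index = 0 if direction == "L" else 1
--         if current_node == "ZZZ":
--             return index, current_node
--         current_node = network[current_node][direction_index]
--     return len(path), current_node
-- ===== SOURCE B (Python) =====
-- def step_count_till_zzz(
--     path: str, network: dict[str, tuple[str, str]], start: str
-- ) -> int:
--     # One flat walk: check ZZZ before each move, pick the direction by count mod len(path).
--     current = start
--     count = 0
--     while current != "ZZZ":
--         direction = path[count % len(path)]
--         current = network[current][0 if direction == "L" else 1]
--         count += 1
--     return count
-- ===== Notes on version B (the rewrite author's own statement) =====
-- stated objective: simpler
-- what changed: Replaced A's two-level decomposition (outer while-loop accumulating chunk counts from a helper that replays the whole path per chunk with enumerate and early return) by one flat while-loop that indexes the path by count mod len(path), with no helper and no chunk bookkeeping.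
import Mathlib
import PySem

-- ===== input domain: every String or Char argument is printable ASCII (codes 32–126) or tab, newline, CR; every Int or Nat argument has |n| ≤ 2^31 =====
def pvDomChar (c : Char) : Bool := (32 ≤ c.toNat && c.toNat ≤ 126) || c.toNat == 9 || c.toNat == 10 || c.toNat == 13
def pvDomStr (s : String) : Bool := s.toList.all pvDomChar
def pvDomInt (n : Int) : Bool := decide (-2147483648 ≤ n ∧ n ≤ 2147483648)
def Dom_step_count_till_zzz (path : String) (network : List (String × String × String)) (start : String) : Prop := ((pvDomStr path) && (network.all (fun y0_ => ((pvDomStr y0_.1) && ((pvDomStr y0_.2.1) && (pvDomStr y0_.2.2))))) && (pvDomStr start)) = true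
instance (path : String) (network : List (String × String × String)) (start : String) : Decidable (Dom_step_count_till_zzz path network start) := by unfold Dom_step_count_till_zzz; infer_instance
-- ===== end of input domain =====

-- B flattens A's outer-while/inner-helper chunked walk into one direct loop indexing the path modularly; same return value wherever A returns (A's KeyError/divergence inputs are outside Pre_).

-- dict lookup network[current] (first match = Python dict built from these pairs)
def pvLookup (network : List (String × String × String)) (k : String) : Option (String × String) :=
  (PySem.Dict.mk network).get? k

-- ===== PORT A =====
-- inner 'for index, direction in enumerate(path)' loop of follow_path_to_zzz
def pvFollowGo (network : List (String × String × String)) (plen : Nat) :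
    List (Int × Char) → String → Int × String
  | [], cur => ((plen : Int), cur)
  | (idx, d) :: rest, cur =>
      let di : Nat := if d = 'L' then 0 else 1
      if cur = "ZZZ" then (idx, cur)
      else
        let pair := (pvLookup network cur).getD ("", "")   -- lookup succeeds under Pre_
        pvFollowGo network plen rest (if di = 0 then pair.1 else pair.2)

def follow_path_to_zzz (path : String) (network : List (String × String × String)) (start : String) : Int × String :=
  pvFollowGo network path.toList.length (PySem.List.enumerate path.toList 0) start

-- 'while True' of A, with fuel (A terminates within this fuel on every input admitted by Pre_)
def pvOuterA (path : String) (network : List (String × String × String)) :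
    Nat → Int → String → Int
  | 0, acc, _ => acc
  | f + 1, acc, cur =>
      let r := follow_path_to_zzz path network cur
      let acc2 := acc + r.1
      if r.2 = "ZZZ" then acc2 else pvOuterA path network f acc2 r.2

def step_count_till_zzz (path : String) (network : List (String × String × String)) (start : String) : Int :=
  pvOuterA path network ((network.length + 1) * path.toList.length + 1) 0 start

-- ===== PORT B =====
-- the single 'while current != "ZZZ"' loop of B, with fuel
def pvLoopB (path : String) (network : List (String × String × String)) :
    Nat → String → Nat → Int
  | 0, _, cnt => (cnt : Int)
  | f + 1, cur, cnt =>
      if cur = "ZZZ" then (cnt : Int)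
      else
        let d := path.toList.getD (cnt % path.toList.length) ' '  -- path[count % len(path)]; in range under Pre_
        let pair := (pvLookup network cur).getD ("", "")          -- lookup succeeds under Pre_
        pvLoopB path network f (if d = 'L' then pair.1 else pair.2) (cnt + 1)

def step_count_till_zzz_alt (path : String) (network : List (String × String × String)) (start : String) : Int :=
  pvLoopB path network ((network.length + 1) * path.toList.length + 1) start 0

-- ===== PRECONDITION & SPEC =====
-- one step of the walk (absorbing at "ZZZ"); none where Python raises (KeyError / empty path)
def pvStep (path : String) (network : List (String × String × String)) (c : String) (n : Nat) : Option String :=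
  if c = "ZZZ" then some c
  else if path.toList.length = 0 then none
  else match pvLookup network c with
    | none => none
    | some pair => some (if path.toList.getD (n % path.toList.length) ' ' = 'L' then pair.1 else pair.2)

def pvWalk (path : String) (network : List (String × String × String)) (start : String) : Nat → Option String
  | 0 => some start
  | n + 1 => match pvWalk path network start n with
    | none => none
    | some c => pvStep path network c n

-- Pre_: the walk from start reaches "ZZZ" (all lookups defined along the way).  By pigeonhole on the
-- (node, position-in-path) state, any walk that ever reaches "ZZZ" does so within
-- (|network|+1)·|path| steps, so this is exactly the set of inputs on which Python A returns
-- (outside it A raises KeyError or loops forever).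
def Pre_step_count_till_zzz (path : String) (network : List (String × String × String)) (start : String) : Prop :=
  pvWalk path network start ((network.length + 1) * path.toList.length) = some "ZZZ"
instance (path : String) (network : List (String × String × String)) (start : String) : Decidable (Pre_step_count_till_zzz path network start) := by unfold Pre_step_count_till_zzz; infer_instance

def pvWitness_step_count_till_zzz : String × (List (String × String × String)) × String :=
  ("L", [("AAA", "ZZZ", "ZZZ")], "AAA")

def Spec_step_count_till_zzz (path : String) (network : List (String × String × String)) (start : String) (out : Int) : Prop := out = step_count_till_zzz_alt path network start
instance (path : String) (network : List (String × String × String)) (start : String) (out : Int) : Decidable (Spec_step_count_till_zzz path network start out) := by unfold Spec_step_count_till_zzz; infer_instance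

-- ===== CLAIM (what is proved, stated in full; the proofs are below) =====
def Claim_equal_step_count_till_zzz : Prop := ∀ (path : String) (network : List (String × String × String)) (start : String), Dom_step_count_till_zzz path network start → Pre_step_count_till_zzz path network start → Spec_step_count_till_zzz path network start (step_count_till_zzz path network start)

-- ===== LEMMAS AND PROOFS =====

theorem pvWalk_isSome_mono (path : String) (network : List (String × String × String)) (start : String)
    {m n : Nat} (hmn : m ≤ n) (h : (pvWalk path network start n).isSome) :
    (pvWalk path network start m).isSome := by
  induction n with
  | zero => simpa [Nat.le_zero.mp hmn] using h
  | succ k ih =>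
    rcases Nat.lt_or_ge m (k+1) with hlt | hge
    · apply ih (by omega)
      rw [pvWalk] at h
      cases hw : pvWalk path network start k with
      | none => rw [hw] at h; simp at h
      | some c => simp
    · have : m = k + 1 := by omega
      simpa [this] using h

theorem walk_before (path : String) (network : List (String × String × String)) (start : String)
    (hex : ∃ n, pvWalk path network start n = some "ZZZ")
    {m : Nat} (hm : m ≤ Nat.find hex) :
    ∃ c, pvWalk path network start m = some c ∧ (m < Nat.find hex → c ≠ "ZZZ") := by
  have hfind := Nat.find_spec hex
  have hs : (pvWalk path network start m).isSome :=
    pvWalk_isSome_mono path network start hm (by rw [hfind]; rfl)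
  rcases Option.isSome_iff_exists.mp hs with ⟨c, hc⟩
  refine ⟨c, hc, fun hlt hz => ?_⟩
  exact Nat.find_min hex hlt (by rw [hc, hz])

theorem walk_step (path : String) (network : List (String × String × String)) (start : String)
    (hex : ∃ n, pvWalk path network start n = some "ZZZ")
    {m : Nat} (hm : m < Nat.find hex) {c : String}
    (hc : pvWalk path network start m = some c) (hcz : c ≠ "ZZZ") :
    path.toList.length ≠ 0 ∧ ∃ pair, pvLookup network c = some pair ∧
      pvWalk path network start (m + 1) =
        some (if path.toList.getD (m % path.toList.length) ' ' = 'L' then pair.1 else pair.2) := by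
  have hfind := Nat.find_spec hex
  have hs : (pvWalk path network start (m + 1)).isSome :=
    pvWalk_isSome_mono path network start hm (by rw [hfind]; rfl)
  rw [pvWalk, hc] at hs ⊢
  simp only [pvStep, hcz, if_false] at hs ⊢
  by_cases hL : path.toList.length = 0
  · simp [hL] at hs
  · simp only [hL, if_false] at hs ⊢
    cases hlk : pvLookup network c with
    | none => rw [hlk] at hs; simp at hs
    | some pair => exact ⟨hL, pair, rfl, rfl⟩

theorem not_zzz_lt_find (path : String) (network : List (String × String × String)) (start : String)
    (hex : ∃ n, pvWalk path network start n = some "ZZZ")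
    {m : Nat} (h1 : m ≤ Nat.find hex) {c : String}
    (hc : pvWalk path network start m = some c) (hz : c ≠ "ZZZ") : m < Nat.find hex := by
  rcases Nat.lt_or_ge m (Nat.find hex) with h | h
  · exact h
  · exfalso
    have he : m = Nat.find hex := by omega
    rw [he, Nat.find_spec hex] at hc
    simp at hc
    exact hz hc.symm

theorem lemB (path : String) (network : List (String × String × String)) (start : String)
    (hex : ∃ n, pvWalk path network start n = some "ZZZ") :
    ∀ (f cnt : Nat) (c : String), pvWalk path network start cnt = some c →
      cnt ≤ Nat.find hex → Nat.find hex ≤ cnt + f →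
      pvLoopB path network f c cnt = ((Nat.find hex : Nat) : Int) := by
  intro f
  induction f with
  | zero =>
    intro cnt c _ h1 h2
    have : cnt = Nat.find hex := by omega
    simp [pvLoopB, this]
  | succ g ih =>
    intro cnt c hc h1 h2
    rw [pvLoopB]
    by_cases hz : c = "ZZZ"
    · have : Nat.find hex ≤ cnt := Nat.find_le (by rw [hc, hz])
      have : cnt = Nat.find hex := by omega
      simp [hz, this]
    · have hlt : cnt < Nat.find hex := not_zzz_lt_find path network start hex h1 hc hz
      rcases walk_step path network start hex hlt hc hz with ⟨hL, pair, hlk, hstep⟩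
      simp only [hz, if_false, hlk, Option.getD_some]
      exact ih (cnt + 1) _ hstep (by omega) (by omega)


theorem lemInner (path : String) (network : List (String × String × String)) (start : String)
    (hex : ∃ n, pvWalk path network start n = some "ZZZ") :
    ∀ (l : List (Int × Char)) (j cnt : Nat) (c : String),
      l = (PySem.List.enumerate path.toList 0).drop j →
      j ≤ path.toList.length → cnt % path.toList.length = 0 →
      pvWalk path network start (cnt + j) = some c → cnt + j ≤ Nat.find hex →
      pvFollowGo network path.toList.length l c =
        if Nat.find hex < cnt + path.toList.length
        then (((Nat.find hex - cnt : Nat) : Int), "ZZZ")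
        else ((path.toList.length : Int),
              (pvWalk path network start (cnt + path.toList.length)).getD "") := by
  intro l
  induction l with
  | nil =>
    intro j cnt c hl hj hcnt hw hle
    have hlen : path.toList.length ≤ j := by
      have := hl.symm
      rw [List.drop_eq_nil_iff] at this
      simpa [PySem.List.length_enumerate] using this
    have hjL : j = path.toList.length := by omega
    have hge : ¬ Nat.find hex < cnt + path.toList.length := by omega
    rw [pvFollowGo, if_neg hge]
    rw [hjL] at hw
    rw [hw]
    rfl
  | cons p rest ih =>
    intro j cnt c hl hj hcnt hw hle
    obtain ⟨idx, d⟩ := p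
    have hjlt : j < path.toList.length := by
      rcases Nat.lt_or_ge j path.toList.length with h | h
      · exact h
      · exfalso
        have : (PySem.List.enumerate path.toList 0).drop j = [] := by
          rw [List.drop_eq_nil_iff]; simpa [PySem.List.length_enumerate] using h
        rw [this] at hl; exact List.cons_ne_nil _ _ hl
    have hjlt' : j < (PySem.List.enumerate path.toList 0).length := by
      simpa [PySem.List.length_enumerate] using hjlt
    rw [List.drop_eq_getElem_cons hjlt', PySem.List.getElem_enumerate] at hl
    rw [List.cons.injEq, Prod.mk.injEq] at hl
    obtain ⟨⟨hidx, hd⟩, hrest⟩ := hl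
    simp only [Int.zero_add] at hidx
    rw [pvFollowGo]
    by_cases hz : c = "ZZZ"
    · have h1 : Nat.find hex ≤ cnt + j := Nat.find_le (by rw [hw, hz])
      have hlt : Nat.find hex < cnt + path.toList.length := by omega
      rw [if_pos hlt, if_pos hz, hidx, Prod.mk.injEq]
      exact ⟨by omega, hz⟩
    · have hlt : cnt + j < Nat.find hex := not_zzz_lt_find path network start hex hle hw hz
      rcases walk_step path network start hex hlt hw hz with ⟨hL, pair, hlk, hstep⟩
      have hq : path.toList.length * (cnt / path.toList.length) = cnt := by
        have := Nat.div_add_mod cnt path.toList.length; omega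
      have hmod : (cnt + j) % path.toList.length = j := by
        rw [← hq, Nat.mul_add_mod]
        exact Nat.mod_eq_of_lt hjlt
      have hgetD : path.toList.getD j ' ' = path.toList[j] := List.getD_eq_getElem _ _ hjlt
      rw [hmod, hgetD] at hstep
      simp only [hz, if_false]
      have harg : (if (if d = 'L' then (0:Nat) else 1) = 0 then pair.1 else pair.2)
          = (if path.toList[j] = 'L' then pair.1 else pair.2) := by
        rw [hd]; by_cases hdl : path.toList[j] = 'L' <;> simp [hdl]
      rw [hlk]
      simp only [Option.getD_some, harg]
      have := ih (j + 1) cnt _ hrest (by omega) hcnt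
        (by rw [show cnt + (j + 1) = cnt + j + 1 by omega]; exact hstep) (by omega)
      exact this

theorem lemOuter (path : String) (network : List (String × String × String)) (start : String)
    (hex : ∃ n, pvWalk path network start n = some "ZZZ") :
    ∀ (f cnt : Nat) (c : String), cnt % path.toList.length = 0 →
      pvWalk path network start cnt = some c →
      cnt ≤ Nat.find hex → Nat.find hex ≤ cnt + f * path.toList.length →
      pvOuterA path network f ((cnt : Nat) : Int) c = ((Nat.find hex : Nat) : Int) := by
  intro f
  induction f with
  | zero =>
    intro cnt c _ _ h1 h2
    simp only [Nat.zero_mul, Nat.add_zero] at h2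
    have : cnt = Nat.find hex := by omega
    simp [pvOuterA, this]
  | succ g ih =>
    intro cnt c hcnt hc h1 h2
    rw [pvOuterA]
    have hinner := lemInner path network start hex (PySem.List.enumerate path.toList 0)
      0 cnt c (by simp) (by omega) hcnt (by simpa using hc) (by omega)
    rw [show follow_path_to_zzz path network c
        = pvFollowGo network path.toList.length (PySem.List.enumerate path.toList 0) c from rfl]
    rw [hinner]
    by_cases hlt : Nat.find hex < cnt + path.toList.length
    · rw [if_pos hlt]
      simp only [if_true]
      omega
    · rw [if_neg hlt]
      rcases walk_before path network start hex
        (show cnt + path.toList.length ≤ Nat.find hex by omega) with ⟨ce, hce, hnz⟩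
      rw [hce]
      simp only [Option.getD_some]
      by_cases hz2 : ce = "ZZZ"
      · have : Nat.find hex ≤ cnt + path.toList.length := Nat.find_le (by rw [hce, hz2])
        rw [if_pos hz2]
        omega
      · rw [if_neg hz2]
        have h2' : Nat.find hex ≤ (cnt + path.toList.length) + g * path.toList.length := by
          rw [Nat.succ_mul] at h2; omega
        have hcnt' : (cnt + path.toList.length) % path.toList.length = 0 := by
          rcases Nat.eq_zero_or_pos path.toList.length with h0 | hpos
          · simpa [h0] using hcnt
          · rw [Nat.add_mod, hcnt, Nat.mod_self]
            simp
        have := ih (cnt + path.toList.length) ce hcnt' hce (by omega) h2'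
        rw [show ((cnt : Int) + (path.toList.length : Int))
            = (((cnt + path.toList.length : Nat) : Nat) : Int) by push_cast; ring]
        exact this

-- ===== VERDICT (by name: the statement is the Claim_ definition above) =====
theorem step_count_till_zzz_spec : Claim_equal_step_count_till_zzz := by
  intro path network start _ hpre
  have hex : ∃ n, pvWalk path network start n = some "ZZZ" :=
    ⟨(network.length + 1) * path.toList.length, hpre⟩
  have hn0 : Nat.find hex ≤ (network.length + 1) * path.toList.length := Nat.find_le hpre
  have hA : step_count_till_zzz path network start = ((Nat.find hex : Nat) : Int) := by
    have hb : Nat.find hex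
        ≤ ((network.length + 1) * path.toList.length + 1) * path.toList.length := by
      rcases Nat.eq_zero_or_pos path.toList.length with h0 | hpos
      · simp [h0] at hn0 ⊢; omega
      · calc Nat.find hex ≤ (network.length + 1) * path.toList.length := hn0
          _ ≤ (network.length + 1) * path.toList.length + 1 := by omega
          _ ≤ ((network.length + 1) * path.toList.length + 1) * path.toList.length :=
              Nat.le_mul_of_pos_right _ hpos
    have := lemOuter path network start hex
      ((network.length + 1) * path.toList.length + 1) 0 start
      (Nat.zero_mod _) rfl (Nat.zero_le _) (by omega)
    simpa [step_count_till_zzz] using this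
  have hB : step_count_till_zzz_alt path network start = ((Nat.find hex : Nat) : Int) := by
    have := lemB path network start hex
      ((network.length + 1) * path.toList.length + 1) 0 start rfl (Nat.zero_le _) (by omega)
    simpa [step_count_till_zzz_alt] using this
  unfold Spec_step_count_till_zzz
  rw [hA, hB]
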